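-- pv_equiv track=rewrite | github.com/Infinidrix/competitive-programming | Fall 2021 Week 6/g.py | solve
-- ===== SOURCE A (Python) =====
-- def solve(nums):
--     ahead_zero = 0
--     total = 0
--     stack = []
--     for i, num in enumerate(nums):
--         if num == 1:
--             if len(stack) != 0:
--                 j = stack.pop()
--                 total += i - j
--             else:
--                 j = max(i + 1, ahead_zero)
--                 while j < len(nums):
--                     if nums[j] == 0:
--                         ahead_zero = j + 1
--                         total += j - i
--                         break
--                     j += 1
--         else:
--             stack.append(i)
--     return total
-- ===== SOURCE B (Python) =====
-- def solve(nums):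
--     # Three-pass, stack-free reformulation:
--     #  - a 1 at i is served by the stack iff the clamped push/pop balance c before i is positive;
--     #    such a pop contributes +i, and a non-1 push at t contributes -t iff it is eventually
--     #    popped, which happens iff the suffix after t still has an unserved pop (deficit d > 0).
--     #  - unmatched 1s are merged with the sorted zero positions by a monotone pointer.
--     c = 0
--     pop_sum = 0
--     unmatched = []
--     zeros = []
--     for i, v in enumerate(nums):
--         if v == 1:
--             if c > 0:
--                 pop_sum += i
--                 c -= 1
--             else:
--                 unmatched.append(i)
--         else:
--             if v == 0:
--                 zeros.append(i)
--             c += 1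
--     d = 0
--     push_sum = 0
--     for t, v in reversed(list(enumerate(nums))):
--         if v == 1:
--             d += 1
--         elif d > 0:
--             push_sum += t
--             d -= 1
--     fwd = 0
--     p = 0
--     for i in unmatched:
--         while p < len(zeros) and zeros[p] <= i:
--             p += 1
--         if p < len(zeros):
--             fwd += zeros[p] - i
--             p += 1
--     return pop_sum - push_sum + fwd
-- ===== Notes on version B (the rewrite author's own statement) =====
-- stated objective: alternative
-- what changed: B eliminates A's index stack and its O(n) forward rescans entirely: it computes each element's signed contribution arithmetically (a 1 at i contributes +i when the clamped balance is positive; a non-1 at t contributes -t iff the suffix deficit after t is positive, detected by a backward pass) and matches the leftover 1s to the precollected zero positions with a monotone merge, so no pair is ever formed explicitly.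
import Mathlib
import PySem

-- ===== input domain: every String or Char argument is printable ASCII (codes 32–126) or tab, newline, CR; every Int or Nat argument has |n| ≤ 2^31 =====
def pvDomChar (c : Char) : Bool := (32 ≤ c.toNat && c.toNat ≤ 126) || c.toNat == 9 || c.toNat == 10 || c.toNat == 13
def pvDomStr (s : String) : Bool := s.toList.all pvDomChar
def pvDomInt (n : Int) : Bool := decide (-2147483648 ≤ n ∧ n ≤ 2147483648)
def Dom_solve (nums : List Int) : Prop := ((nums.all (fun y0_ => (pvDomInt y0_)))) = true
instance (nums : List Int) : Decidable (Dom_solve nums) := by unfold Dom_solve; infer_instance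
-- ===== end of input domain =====

-- B is a stack-free reformulation: each element's signed contribution is computed
-- arithmetically in a forward and a backward pass, and leftover 1s are merged with
-- the collected zero positions by a monotone pointer (objective: alternative algorithm).

-- ===== PORT A =====
-- the inner `while j < len(nums): if nums[j] == 0: … break; j += 1` loop
def findZero (nums : List Int) (j : Int) : Option Int :=
  if h : j < (nums.length : Int) then
    if PySem.List.pyGet? nums j = some 0 then some j
    else findZero nums (j + 1)
  else none
termination_by ((nums.length : Int) - j).toNat
decreasing_by omega

-- one iteration of A's for-loop; state = (ahead_zero, total, stack) (stack top at head)
def stepA (nums : List Int) (st : Int × Int × List Int) (pr : Int × Int) : Int × Int × List Int :=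
  let (az, tot, stk) := st
  let (i, num) := pr
  if num = 1 then
    match stk with
    | j :: rest => (az, tot + (i - j), rest)
    | [] =>
      match findZero nums (max (i + 1) az) with
      | some j => (j + 1, tot + (j - i), [])
      | none => (az, tot, [])
  else (az, tot, i :: stk)

def solve (nums : List Int) : Int :=
  ((PySem.List.enumerate nums 0).foldl (stepA nums) (0, 0, [])).2.1

-- ===== PORT B =====
-- B pass 1: state = (c, pop_sum, unmatched, zeros)
def pass1Step (st : Int × Int × List Int × List Int) (pr : Int × Int) : Int × Int × List Int × List Int :=
  let (c, ps, u, z) := st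
  let (i, v) := pr
  if v = 1 then
    if c > 0 then (c - 1, ps + i, u, z) else (c, ps, u ++ [i], z)
  else
    (c + 1, ps, u, if v = 0 then z ++ [i] else z)

-- B pass 2 (backward): state = (d, push_sum)
def pass2Step (st : Int × Int) (pr : Int × Int) : Int × Int :=
  let (d, ps) := st
  let (t, v) := pr
  if v = 1 then (d + 1, ps)
  else if d > 0 then (d - 1, ps + t) else (d, ps)

-- B's `while p < len(zeros) and zeros[p] <= i: p += 1`
def advance (zeros : List Int) (i : Int) (p : Nat) : Nat :=
  if h : p < zeros.length then
    if zeros[p] ≤ i then advance zeros i (p + 1) else p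
  else p
termination_by zeros.length - p

-- B pass 3 (merge of unmatched 1s with zeros): state = (fwd, p)
def pass3Step (zeros : List Int) (st : Int × Nat) (i : Int) : Int × Nat :=
  let (fwd, p) := st
  let p' := advance zeros i p
  if h : p' < zeros.length then (fwd + (zeros[p'] - i), p' + 1) else (fwd, p')

def solve_alt (nums : List Int) : Int :=
  let e := PySem.List.enumerate nums 0
  let s1 := e.foldl pass1Step (0, 0, [], [])
  let s2 := e.reverse.foldl pass2Step (0, 0)
  let s3 := (s1.2.2.1).foldl (pass3Step s1.2.2.2) (0, 0)
  s1.2.1 - s2.2 + s3.1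

-- ===== PRECONDITION & SPEC =====
def Spec_solve (nums : List Int) (out : Int) : Prop := out = solve_alt nums
instance (nums : List Int) (out : Int) : Decidable (Spec_solve nums out) := by unfold Spec_solve; infer_instance

-- ===== CLAIM (what is proved, stated in full; the proofs are below) =====
def Claim_equal_solve : Prop := ∀ (nums : List Int), Dom_solve nums → Spec_solve nums (solve nums)

-- ===== LEMMAS AND PROOFS =====

-- zero positions of nums (a proof-side name for the list built by B's pass 1)
def zl (l : List (Int × Int)) : List Int :=
  (l.filter (fun pr => pr.2 == 0)).map Prod.fst

def zerosOf (nums : List Int) : List Int := zl (PySem.List.enumerate nums 0)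

-- the "deficit" of an event suffix: unserved pops
def dD : List (Int × Int) → Nat
  | [] => 0
  | (_, v) :: r => if v = 1 then dD r + 1 else dD r - 1

-- sum of indices of pushes that eventually get popped
def pms : List (Int × Int) → Int
  | [] => 0
  | (t, v) :: r => if v = 1 then pms r else (if 1 ≤ dD r then t else 0) + pms r

-- sum of indices of served pops, given an initial stack of size m
def pis : List (Int × Int) → Nat → Int
  | [], _ => 0
  | (i, v) :: r, m =>
    if v = 1 then (match m with | 0 => pis r 0 | m' + 1 => i + pis r m') else pis r (m + 1)

-- the indices of unserved pops (A's forward-scanning 1s), given initial stack size m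
def um : List (Int × Int) → Nat → List Int
  | [], _ => []
  | (i, v) :: r, m =>
    if v = 1 then (match m with | 0 => i :: um r 0 | m' + 1 => um r m') else um r (m + 1)

def takeSum (n : Nat) (s : List Int) : Int := (s.take n).sum

-- A's forward-scan contribution, as a recursion over the event list
def fwdS (nums : List Int) : List (Int × Int) → Int → Nat → Int
  | [], _, _ => 0
  | (i, v) :: r, az, m =>
    if v = 1 then
      match m with
      | 0 =>
        match findZero nums (max (i + 1) az) with
        | some j => (j - i) + fwdS nums r (j + 1) 0
        | none => fwdS nums r az 0
      | m' + 1 => fwdS nums r az m'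
    else fwdS nums r az (m + 1)

theorem takeSum_succ_cons (n : Nat) (j : Int) (s : List Int) :
    takeSum (n + 1) (j :: s) = j + takeSum n s := by
  simp [takeSum]

-- the decomposition of A's foldl into the four quantities
theorem decompA (nums : List Int) :
    ∀ (l : List (Int × Int)) (az tot : Int) (stk : List Int),
      ((l.foldl (stepA nums) (az, tot, stk)).2.1 =
        tot + pis l stk.length - pms l - takeSum (min stk.length (dD l)) stk
          + fwdS nums l az stk.length) := by
  intro l
  induction l with
  | nil => intro az tot stk; simp [pis, pms, dD, fwdS, takeSum]
  | cons pr r ih =>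
    intro az tot stk
    obtain ⟨i, v⟩ := pr
    by_cases hv : v = 1
    · subst hv
      cases stk with
      | cons j rest =>
        have hA : stepA nums (az, tot, j :: rest) (i, 1) = (az, tot + (i - j), rest) := by
          simp [stepA]
        rw [List.foldl_cons, hA, ih]
        have h1 : min (j :: rest).length (dD ((i, 1) :: r)) = min rest.length (dD r) + 1 := by
          simp [dD]
        have h2 : pis ((i, 1) :: r) (j :: rest).length = i + pis r rest.length := by
          simp [pis]
        have h3 : fwdS nums ((i, 1) :: r) az (j :: rest).length = fwdS nums r az rest.length := by
          simp [fwdS]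
        have h4 : pms ((i, 1) :: r) = pms r := by simp [pms]
        rw [h1, h2, h3, h4, takeSum_succ_cons]
        ring
      | nil =>
        have h2 : pis ((i, 1) :: r) 0 = pis r 0 := by simp [pis]
        have h4 : pms ((i, 1) :: r) = pms r := by simp [pms]
        cases hfz : findZero nums (max (i + 1) az) with
        | some j =>
          have hA : stepA nums (az, tot, []) (i, 1) = (j + 1, tot + (j - i), []) := by
            simp [stepA, hfz]
          have h3 : fwdS nums ((i, 1) :: r) az 0 = (j - i) + fwdS nums r (j + 1) 0 := by
            simp [fwdS, hfz]
          rw [List.foldl_cons, hA, ih]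
          simp only [List.length_nil]
          rw [h2, h3, h4]
          simp [takeSum]
          ring
        | none =>
          have hA : stepA nums (az, tot, []) (i, 1) = (az, tot, []) := by
            simp [stepA, hfz]
          have h3 : fwdS nums ((i, 1) :: r) az 0 = fwdS nums r az 0 := by
            simp [fwdS, hfz]
          rw [List.foldl_cons, hA, ih]
          simp only [List.length_nil]
          rw [h2, h3, h4]
          simp [takeSum]
    · have hA : stepA nums (az, tot, stk) (i, v) = (az, tot, i :: stk) := by
        simp [stepA, hv]
      rw [List.foldl_cons, hA, ih]
      have h2 : pis ((i, v) :: r) stk.length = pis r (stk.length + 1) := by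
        simp [pis, hv]
      have h3 : fwdS nums ((i, v) :: r) az stk.length = fwdS nums r az (stk.length + 1) := by
        simp [fwdS, hv]
      have h4 : pms ((i, v) :: r) = (if 1 ≤ dD r then i else 0) + pms r := by
        simp [pms, hv]
      have h5 : takeSum (min (stk.length + 1) (dD r)) (i :: stk)
          = (if 1 ≤ dD r then i else 0) + takeSum (min stk.length (dD ((i, v) :: r))) stk := by
        simp only [dD, if_neg hv]
        by_cases hd : 1 ≤ dD r
        · have hmin : min (stk.length + 1) (dD r) = min stk.length (dD r - 1) + 1 := by omega
          rw [hmin, takeSum_succ_cons, if_pos hd]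
        · have hd0 : dD r = 0 := by omega
          simp [hd0, takeSum]
      simp only [List.length_cons]
      rw [h2, h3, h4, h5]
      ring
  -- (length of i :: stk is stk.length + 1, handled definitionally above)

-- pass-1 characterisation: pop_sum, unmatched and zeros of B's first loop
theorem pass1_spec :
    ∀ (l : List (Int × Int)) (c ps : Int) (u z : List Int), 0 ≤ c →
      (l.foldl pass1Step (c, ps, u, z)).2.1 = ps + pis l c.toNat
      ∧ (l.foldl pass1Step (c, ps, u, z)).2.2.1 = u ++ um l c.toNat
      ∧ (l.foldl pass1Step (c, ps, u, z)).2.2.2 = z ++ zl l := by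
  intro l
  induction l with
  | nil => intro c ps u z hc; simp [pis, um, zl]
  | cons pr r ih =>
    intro c ps u z hc
    obtain ⟨i, v⟩ := pr
    by_cases hv : v = 1
    · subst hv
      by_cases hcpos : c > 0
      · have hstep : pass1Step (c, ps, u, z) (i, 1) = (c - 1, ps + i, u, z) := by
          simp [pass1Step, hcpos]
        obtain ⟨ih1, ih2, ih3⟩ := ih (c - 1) (ps + i) u z (by omega)
        have hct : c.toNat = (c - 1).toNat + 1 := by omega
        rw [List.foldl_cons, hstep]
        refine ⟨?_, ?_, ?_⟩
        · rw [ih1, hct]; simp [pis]; ring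
        · rw [ih2, hct]; simp [um]
        · rw [ih3]; simp [zl]
      · have hc0 : c = 0 := by omega
        subst hc0
        have hstep : pass1Step (0, ps, u, z) (i, 1) = (0, ps, u ++ [i], z) := by
          simp [pass1Step]
        obtain ⟨ih1, ih2, ih3⟩ := ih 0 ps (u ++ [i]) z le_rfl
        rw [List.foldl_cons, hstep]
        refine ⟨?_, ?_, ?_⟩
        · rw [ih1]; simp [pis]
        · rw [ih2]; simp [um]
        · rw [ih3]; simp [zl]
    · have hstep : pass1Step (c, ps, u, z) (i, v)
          = (c + 1, ps, u, if v = 0 then z ++ [i] else z) := by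
        simp [pass1Step, hv]
      obtain ⟨ih1, ih2, ih3⟩ := ih (c + 1) ps u (if v = 0 then z ++ [i] else z) (by omega)
      have hct : (c + 1).toNat = c.toNat + 1 := by omega
      rw [List.foldl_cons, hstep]
      refine ⟨?_, ?_, ?_⟩
      · rw [ih1, hct]; simp [pis, hv]
      · rw [ih2, hct]; simp [um, hv]
      · rw [ih3]
        by_cases hv0 : v = 0
        · simp [zl, hv0]
        · simp [zl, hv0]

-- pass-2 characterisation: the backward loop computes (deficit, pms)
theorem pass2_spec :
    ∀ (l : List (Int × Int)),
      l.reverse.foldl pass2Step (0, 0) = ((dD l : Int), pms l) := by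
  intro l
  induction l with
  | nil => simp [dD, pms]
  | cons pr r ih =>
    obtain ⟨t, v⟩ := pr
    rw [List.reverse_cons, List.foldl_append, ih]
    simp only [List.foldl_cons, List.foldl_nil, pass2Step, dD, pms]
    by_cases hv : v = 1
    · simp [hv]
    · by_cases hd : 1 ≤ dD r
      · have hdpos : ((dD r : Int)) > 0 := by exact_mod_cast hd
        rw [if_neg hv, if_neg hv, if_neg hv, if_pos hdpos, if_pos hd]
        simp only [Prod.mk.injEq]
        constructor
        · omega
        · ring
      · have hd0 : dD r = 0 := by omega
        rw [if_neg hv, if_neg hv, if_neg hv, if_neg (by simp [hd0] : ¬ ((dD r : Int)) > 0), if_neg hd]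
        simp [hd0]

-- facts about the zero-position list
theorem zerosOf_sorted (nums : List Int) : (zerosOf nums).Pairwise (· < ·) := by
  unfold zerosOf zl
  rw [List.pairwise_map]
  exact (PySem.List.pairwise_lt_enumerate nums 0).filter _

theorem mem_zerosOf (nums : List Int) (z : Int) :
    z ∈ zerosOf nums ↔ ∃ (t : Nat) (ht : t < nums.length), z = (t : Int) ∧ nums[t] = 0 := by
  unfold zerosOf zl
  simp only [List.mem_map, List.mem_filter, PySem.List.mem_enumerate_iff]
  constructor
  · rintro ⟨⟨a, b⟩, ⟨⟨t, ht, hab⟩, hb⟩, hz⟩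
    cases hab
    exact ⟨t, ht, by simpa using hz.symm, by simpa using hb⟩
  · rintro ⟨t, ht, hz, h0⟩
    exact ⟨((t : Int), nums[t]), ⟨⟨t, ht, by simp⟩, by simpa using h0⟩, by simpa using hz.symm⟩

-- findZero characterisation
theorem findZero_some (nums : List Int) (j j' : Int) (h : findZero nums j = some j') :
    j ≤ j' ∧ j' < (nums.length : Int) ∧ PySem.List.pyGet? nums j' = some 0 ∧
      ∀ t : Int, j ≤ t → t < j' → PySem.List.pyGet? nums t ≠ some 0 := by
  fun_induction findZero nums j with
  | case1 j hlt h0 =>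
    simp only [Option.some.injEq] at h
    subst h
    exact ⟨le_refl _, hlt, h0, fun t h1 h2 => absurd (le_antisymm h1 (by omega) : j = t) (by omega)⟩
  | case2 j hlt h0 ih =>
    obtain ⟨h1, h2, h3, h4⟩ := ih h
    refine ⟨by omega, h2, h3, ?_⟩
    intro t ht1 ht2
    rcases eq_or_lt_of_le ht1 with heq | hlt'
    · subst heq; exact h0
    · exact h4 t (by omega) ht2
  | case3 j hge => simp at h

theorem findZero_none (nums : List Int) (j : Int) (h : findZero nums j = none) :
    ∀ t : Int, j ≤ t → t < (nums.length : Int) → PySem.List.pyGet? nums t ≠ some 0 := by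
  fun_induction findZero nums j with
  | case1 j hlt h0 => simp at h
  | case2 j hlt h0 ih =>
    intro t ht1 ht2
    rcases eq_or_lt_of_le ht1 with heq | hlt'
    · subst heq; exact h0
    · exact ih h t (by omega) ht2
  | case3 j hge =>
    intro t ht1 ht2; omega

-- advance characterisation
theorem advance_spec (zeros : List Int) (i : Int) (p : Nat) (hp : p ≤ zeros.length) :
    p ≤ advance zeros i p ∧ advance zeros i p ≤ zeros.length ∧
      (∀ (q : Nat) (hq : q < zeros.length), p ≤ q → q < advance zeros i p → zeros[q] ≤ i) ∧
      (∀ hq : advance zeros i p < zeros.length, i < zeros[advance zeros i p]) := by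
  fun_induction advance zeros i p with
  | case1 p hlt hle ih =>
    obtain ⟨h1, h2, h3, h4⟩ := ih hlt
    refine ⟨by omega, h2, ?_, h4⟩
    intro q hq hq1 hq2
    rcases Nat.eq_or_lt_of_le hq1 with heq | hlt'
    · subst heq; exact hle
    · exact h3 q hq hlt' hq2
  | case2 p hlt hgt =>
    exact ⟨le_refl _, by omega, fun q hq h1 h2 => by omega, fun hq => by omega⟩
  | case3 p hge =>
    exact ⟨le_refl _, by omega, fun q hq h1 h2 => by omega, fun hq => by omega⟩

-- the coupling invariant between A's ahead_zero and B's pointer after k items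
def CoupInv (zeros : List Int) (k : Nat) (az : Int) (p : Nat) : Prop :=
  0 ≤ az ∧ p ≤ zeros.length ∧
  (∀ (q : Nat) (hq : q < zeros.length), q < p → zeros[q] < max (k : Int) az) ∧
  (∀ (q : Nat) (hq : q < zeros.length), p ≤ q → az ≤ zeros[q])

theorem coupinv_succ {zeros : List Int} {k : Nat} {az : Int} {p : Nat}
    (h : CoupInv zeros k az p) : CoupInv zeros (k + 1) az p := by
  obtain ⟨h1, h2, h3, h4⟩ := h
  refine ⟨h1, h2, ?_, h4⟩
  intro q hq hqp
  have := h3 q hq hqp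
  push_cast at this ⊢
  omega

-- the forward-scan contribution of A equals B's pass-3 merge
theorem fwd_invariant (nums : List Int) :
    ∀ (l : List Int) (k : Nat) (az : Int) (m : Nat) (p : Nat) (acc : Int),
      nums.drop k = l → CoupInv (zerosOf nums) k az p →
      ((um (PySem.List.enumerate l k) m).foldl (pass3Step (zerosOf nums)) (acc, p)).1
        = acc + fwdS nums (PySem.List.enumerate l k) az m := by
  intro l
  induction l with
  | nil => intro k az m p acc _ _; simp [PySem.List.enumerate, um, fwdS]
  | cons x l' ih =>
    intro k az m p acc hdrop hinv
    have hk : k < nums.length := by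
      by_contra hge
      rw [List.drop_eq_nil_of_le (by omega)] at hdrop
      exact (List.cons_ne_nil _ _) hdrop.symm
    have hsplit : nums[k] :: nums.drop (k + 1) = nums.drop k := List.getElem_cons_drop hk
    rw [hdrop] at hsplit
    have hx : nums[k] = x := (List.cons.injEq _ _ _ _ ▸ hsplit).1
    have hl' : nums.drop (k + 1) = l' := (List.cons.injEq _ _ _ _ ▸ hsplit).2
    rw [PySem.List.enumerate_cons]
    have hcast : ((k : Int) + 1) = (((k + 1 : Nat)) : Int) := by push_cast; ring
    rw [hcast]
    by_cases hx1 : x = 1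
    · subst hx1
      cases m with
      | succ m' =>
        have hum : um (((k : Int), 1) :: PySem.List.enumerate l' ((k + 1 : Nat) : Int)) (m' + 1)
            = um (PySem.List.enumerate l' ((k + 1 : Nat) : Int)) m' := by simp [um]
        have hfw : fwdS nums (((k : Int), 1) :: PySem.List.enumerate l' ((k + 1 : Nat) : Int)) az (m' + 1)
            = fwdS nums (PySem.List.enumerate l' ((k + 1 : Nat) : Int)) az m' := by simp [fwdS]
        rw [hum, hfw]
        exact ih (k + 1) az m' p acc hl' (coupinv_succ hinv)
      | zero =>
        have hum : um (((k : Int), 1) :: PySem.List.enumerate l' ((k + 1 : Nat) : Int)) 0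
            = (k : Int) :: um (PySem.List.enumerate l' ((k + 1 : Nat) : Int)) 0 := by simp [um]
        rw [hum, List.foldl_cons]
        obtain ⟨haz0, hplen, hc3, hc4⟩ := hinv
        set zeros := zerosOf nums with hzeros
        set p' := advance zeros (k : Int) p with hp'
        obtain ⟨hpp', hp'len, hadv3, hadv4⟩ := advance_spec zeros (k : Int) p hplen
        have hsorted := List.pairwise_iff_getElem.mp (zerosOf_sorted nums)
        simp only [← hzeros] at hsorted
        have hidx : ∀ (q : Nat) (hq : q < zeros.length),
            max ((k : Int) + 1) az ≤ zeros[q] → p' ≤ q := by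
          intro q hq hge
          by_contra hlt
          push Not at hlt
          rcases Nat.lt_or_ge q p with h' | h'
          · have := hc3 q hq h'; omega
          · have := hadv3 q hq h' hlt; omega
        by_cases hplt : p' < zeros.length
        · set z := zeros[p'] with hzval
          have hzk : (k : Int) < z := hadv4 hplt
          have hzaz : az ≤ z := hc4 p' hplt hpp'
          rcases (mem_zerosOf nums z).1 (hzval ▸ List.getElem_mem hplt) with ⟨t, ht, hzt, ht0⟩
          have hzget : PySem.List.pyGet? nums z = some 0 := by
            rw [hzt]
            simp [PySem.List.pyGet?_natCast, List.getElem?_eq_getElem ht, ht0]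
          have hzlt : z < (nums.length : Int) := by rw [hzt]; exact_mod_cast ht
          cases hfz : findZero nums (max ((k : Int) + 1) az) with
          | none =>
            exact absurd hzget (findZero_none nums _ hfz z (by omega) hzlt)
          | some j' =>
            obtain ⟨hj1, hj2, hj3, hj4⟩ := findZero_some nums _ j' hfz
            have hmaxk : (k : Int) + 1 ≤ j' := le_trans (le_max_left _ _) hj1
            have hmaxaz : az ≤ j' := le_trans (le_max_right _ _) hj1
            have hj'0 : 0 ≤ j' := by omega
            rw [PySem.List.pyGet?_of_nonneg _ hj'0] at hj3
            obtain ⟨hjlt, hjval⟩ := List.getElem?_eq_some_iff.mp hj3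
            have hjmem : j' ∈ zeros :=
              (mem_zerosOf nums j').2 ⟨j'.toNat, hjlt, (Int.toNat_of_nonneg hj'0).symm, hjval⟩
            rcases List.mem_iff_getElem.mp hjmem with ⟨q, hq, hqj⟩
            have hq' : p' ≤ q := hidx q hq (by rw [hqj]; exact hj1)
            have hzj : z ≤ j' := by
              rcases Nat.eq_or_lt_of_le hq' with he | hlt
              · have hqz : zeros[q]? = some z := by
                  rw [← he, List.getElem?_eq_getElem hplt, ← hzval]
                rw [List.getElem?_eq_getElem hq] at hqz
                have := Option.some.inj hqz
                omega
              · have := hsorted p' q hplt hq hlt; omega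
            have hjz : ¬ z < j' := fun hlt => hj4 z (by omega) hlt hzget
            have hje : j' = z := by omega
            have hstep : pass3Step zeros (acc, p) (k : Int) = (acc + (z - (k : Int)), p' + 1) := by
              simp only [pass3Step, ← hp', dif_pos hplt]
              rw [hzval]
            have hfw : fwdS nums (((k : Int), 1) :: PySem.List.enumerate l' ((k + 1 : Nat) : Int)) az 0
                = (z - (k : Int)) + fwdS nums (PySem.List.enumerate l' ((k + 1 : Nat) : Int)) (z + 1) 0 := by
              rw [← hje]
              simp [fwdS, hfz]
            rw [hstep, hfw]
            have hnext := ih (k + 1) (z + 1) 0 (p' + 1) (acc + (z - (k : Int))) hl' ?inv2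
            · rw [hnext]; ring
            case inv2 =>
              refine ⟨by omega, by omega, ?_, ?_⟩
              · intro q hq hqp
                push_cast
                rcases Nat.lt_or_ge q p with h' | h'
                · have := hc3 q hq h'; push_cast at this; omega
                · rcases Nat.lt_or_ge q p' with h'' | h''
                  · have := hadv3 q hq h' h''; omega
                  · have hqe : q = p' := by omega
                    subst hqe; omega
              · intro q hq hge
                have := hsorted p' q hplt hq (by omega)
                omega
        · have hp'eq : p' = zeros.length := by omega
          have hfz : findZero nums (max ((k : Int) + 1) az) = none := by
            cases hfz : findZero nums (max ((k : Int) + 1) az) with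
            | none => rfl
            | some j' =>
              obtain ⟨hj1, hj2, hj3, hj4⟩ := findZero_some nums _ j' hfz
              have hmaxk : (k : Int) + 1 ≤ j' := le_trans (le_max_left _ _) hj1
              have hmaxaz : az ≤ j' := le_trans (le_max_right _ _) hj1
              have hj'0 : 0 ≤ j' := by omega
              rw [PySem.List.pyGet?_of_nonneg _ hj'0] at hj3
              obtain ⟨hjlt, hjval⟩ := List.getElem?_eq_some_iff.mp hj3
              have hjmem : j' ∈ zeros :=
                (mem_zerosOf nums j').2 ⟨j'.toNat, hjlt, (Int.toNat_of_nonneg hj'0).symm, hjval⟩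
              rcases List.mem_iff_getElem.mp hjmem with ⟨q, hq, hqj⟩
              have := hidx q hq (by rw [hqj]; exact hj1)
              omega
          have hstep : pass3Step zeros (acc, p) (k : Int) = (acc, p') := by
            simp only [pass3Step, ← hp', dif_neg hplt]
          have hfw : fwdS nums (((k : Int), 1) :: PySem.List.enumerate l' ((k + 1 : Nat) : Int)) az 0
              = fwdS nums (PySem.List.enumerate l' ((k + 1 : Nat) : Int)) az 0 := by
            simp [fwdS, hfz]
          rw [hstep, hfw]
          apply ih (k + 1) az 0 p' acc hl'
          refine ⟨haz0, by omega, ?_, ?_⟩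
          · intro q hq hqp
            push_cast
            rcases Nat.lt_or_ge q p with h' | h'
            · have := hc3 q hq h'; push_cast at this; omega
            · have := hadv3 q hq h' (by omega); omega
          · intro q hq hge
            omega
    · have hum : um (((k : Int), x) :: PySem.List.enumerate l' ((k + 1 : Nat) : Int)) m
          = um (PySem.List.enumerate l' ((k + 1 : Nat) : Int)) (m + 1) := by simp [um, hx1]
      have hfw : fwdS nums (((k : Int), x) :: PySem.List.enumerate l' ((k + 1 : Nat) : Int)) az m
          = fwdS nums (PySem.List.enumerate l' ((k + 1 : Nat) : Int)) az (m + 1) := by simp [fwdS, hx1]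
      rw [hum, hfw]
      exact ih (k + 1) az (m + 1) p acc hl' (coupinv_succ hinv)

theorem coupinv_init (nums : List Int) : CoupInv (zerosOf nums) 0 0 0 := by
  refine ⟨le_refl 0, Nat.zero_le _, ?_, ?_⟩
  · intro q hq h'; omega
  · intro q hq _
    have hm : (zerosOf nums)[q] ∈ zerosOf nums := List.getElem_mem hq
    rcases (mem_zerosOf nums _).1 hm with ⟨t, ht, hzt, _⟩
    omega

-- ===== VERDICT (by name: the statement is the Claim_ definition above) =====
theorem solve_spec : Claim_equal_solve := by
  intro nums _
  unfold Spec_solve solve solve_alt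
  obtain ⟨h1, h2, h3⟩ :=
    pass1_spec (PySem.List.enumerate nums 0) 0 0 [] [] le_rfl
  have hd := decompA nums (PySem.List.enumerate nums 0) 0 0 []
  have hp2 := pass2_spec (PySem.List.enumerate nums 0)
  have hfwd := fwd_invariant nums nums 0 0 0 0 0 rfl (coupinv_init nums)
  simp only [List.nil_append] at h1 h2 h3
  simp only [h1, h2, h3, hp2]
  rw [hd]
  have hz : zerosOf nums = zl (PySem.List.enumerate nums 0) := rfl
  rw [← hz]
  simp only [Nat.cast_zero] at hfwd
  simp only [List.length_nil, Nat.zero_min, takeSum, List.take_zero, List.sum_nil,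
    Int.toNat_zero] at *
  rw [hfwd]
  ring
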